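-- pv_equiv track=rewrite | github.com/Oakhampton1111/AULquoteapp | tools/kg/memory_enforcer.py | _memory_applies
-- ===== SOURCE A (Python) =====
-- from typing import Dict, List, Optional, Set, Any
--
-- def _memory_applies(memory: Dict, operation_type: str, context: Dict) -> bool:
--     """Check if a memory applies to the current operation"""
--     # Global memories always apply
--     if 'user_global' in memory.get('tags', []):
--         return True
--
--     # Check operation-specific memories
--     if operation_type in memory.get('tags', []):
--         return True
--
--     # Check context-specific memories
--     if any(tag in context.get('tags', []) for tag in memory.get('tags', [])):
--         return True
--
--     return False
-- ===== SOURCE B (Python) =====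
-- def _memory_applies(memory, operation_type, context):
--     """Check if a memory applies to the current operation"""
--     # Sort-then-merge intersection test: the memory applies iff its tag list
--     # shares an element with ['user_global', operation_type] + context tags.
--     a = sorted(memory.get('tags', []))
--     b = sorted(['user_global', operation_type] + list(context.get('tags', [])))
--     i = j = 0
--     while i < len(a) and j < len(b):
--         if a[i] == b[j]:
--             return True
--         if a[i] < b[j]:
--             i += 1
--         else:
--             j += 1
--     return False
-- ===== Notes on version B (the rewrite author's own statement) =====
-- stated objective: alternative
-- what changed: Replaces the three sequential membership guards with a sort-then-merge intersection test: both tag lists (memory tags vs 'user_global' + operation_type + context tags) are sorted and a single two-pointer merge scan detects a common element.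
import Mathlib
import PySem

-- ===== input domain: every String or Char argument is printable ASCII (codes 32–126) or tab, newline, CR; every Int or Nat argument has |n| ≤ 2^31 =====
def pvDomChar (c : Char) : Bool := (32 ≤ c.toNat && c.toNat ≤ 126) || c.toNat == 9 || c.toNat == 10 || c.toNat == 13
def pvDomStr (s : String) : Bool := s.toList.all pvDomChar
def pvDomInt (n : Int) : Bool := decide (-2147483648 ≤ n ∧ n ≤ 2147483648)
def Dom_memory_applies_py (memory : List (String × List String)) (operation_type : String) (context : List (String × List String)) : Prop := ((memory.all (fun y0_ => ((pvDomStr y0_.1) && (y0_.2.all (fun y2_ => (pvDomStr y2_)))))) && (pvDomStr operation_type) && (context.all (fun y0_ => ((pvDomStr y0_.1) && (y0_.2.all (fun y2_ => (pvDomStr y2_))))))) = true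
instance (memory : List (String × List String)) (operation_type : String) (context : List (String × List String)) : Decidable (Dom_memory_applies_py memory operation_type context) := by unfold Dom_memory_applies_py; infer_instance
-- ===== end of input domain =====

-- B replaces A's three sequential membership guards by a sort-then-merge
-- intersection test between the memory's tags and all the candidate tags (alternative decomposition).

-- ===== PORT A =====
def memory_applies_py (memory : List (String × List String)) (operation_type : String) (context : List (String × List String)) : Bool :=
  -- if 'user_global' in memory.get('tags', []): return True
  if (PySem.Dict.getD (PySem.Dict.mk memory) "tags" []).contains "user_global" then true
  -- if operation_type in memory.get('tags', []): return True
  else if (PySem.Dict.getD (PySem.Dict.mk memory) "tags" []).contains operation_type then true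
  -- if any(tag in context.get('tags', []) for tag in memory.get('tags', [])): return True
  else if (PySem.Dict.getD (PySem.Dict.mk memory) "tags" []).any (fun tag => (PySem.Dict.getD (PySem.Dict.mk context) "tags" []).contains tag) then true
  else false

-- ===== PORT B =====
-- the two-pointer merge scan of Source B, as the obvious structural recursion on the two sorted lists
def pvMergeHas : List String → List String → Bool
  | [], _ => false
  | _ :: _, [] => false
  | x :: xs, y :: ys =>
    if x == y then true
    else if x < y then pvMergeHas xs (y :: ys)
    else pvMergeHas (x :: xs) ys

def memory_applies_py_alt (memory : List (String × List String)) (operation_type : String) (context : List (String × List String)) : Bool :=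
  -- a = sorted(memory.get('tags', []))
  let a := PySem.List.sorted (PySem.Dict.getD (PySem.Dict.mk memory) "tags" []) (fun x => x) false
  -- b = sorted(['user_global', operation_type] + list(context.get('tags', [])))
  let b := PySem.List.sorted (["user_global", operation_type] ++ PySem.Dict.getD (PySem.Dict.mk context) "tags" []) (fun x => x) false
  -- two-pointer merge scan
  pvMergeHas a b

-- ===== PRECONDITION & SPEC =====
def Spec_memory_applies_py (memory : List (String × List String)) (operation_type : String) (context : List (String × List String)) (out : Bool) : Prop := out = memory_applies_py_alt memory operation_type context
instance (memory : List (String × List String)) (operation_type : String) (context : List (String × List String)) (out : Bool) : Decidable (Spec_memory_applies_py memory operation_type context out) := by unfold Spec_memory_applies_py; infer_instance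

-- ===== CLAIM =====
def Claim_equal_memory_applies_py : Prop := ∀ (memory : List (String × List String)) (operation_type : String) (context : List (String × List String)), Dom_memory_applies_py memory operation_type context → Spec_memory_applies_py memory operation_type context (memory_applies_py memory operation_type context)

-- ===== LEMMAS AND PROOFS =====

-- On sorted lists, the merge scan decides whether the lists share an element.
theorem pvMergeHas_iff (a b : List String)
    (ha : a.Pairwise (· ≤ ·)) (hb : b.Pairwise (· ≤ ·)) :
    pvMergeHas a b = true ↔ ∃ x, x ∈ a ∧ x ∈ b := by
  induction a generalizing b with
  | nil => simp [pvMergeHas]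
  | cons x xs ih =>
    induction b with
    | nil => simp [pvMergeHas]
    | cons y ys ihb =>
      rw [List.pairwise_cons] at ha hb
      by_cases hxy : x = y
      · subst hxy
        simp only [pvMergeHas, beq_self_eq_true, if_true, true_iff]
        exact ⟨x, by simp, by simp⟩
      · simp only [pvMergeHas, beq_iff_eq, hxy, if_false]
        by_cases hlt : x < y
        · rw [if_pos hlt, ih _ ha.2 (List.pairwise_cons.mpr hb)]
          constructor
          · rintro ⟨z, hz1, hz2⟩; exact ⟨z, List.mem_cons_of_mem _ hz1, hz2⟩
          · rintro ⟨z, hz1, hz2⟩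
            rcases List.mem_cons.mp hz1 with rfl | hz1'
            · rcases List.mem_cons.mp hz2 with rfl | hz2'
              · exact absurd rfl hxy
              · exact absurd (hb.1 _ hz2') (not_le.mpr hlt)
            · exact ⟨z, hz1', hz2⟩
        · have hyx : y < x := lt_of_le_of_ne (not_lt.mp hlt) (Ne.symm hxy)
          rw [if_neg hlt, ihb hb.2]
          constructor
          · rintro ⟨z, hz1, hz2⟩; exact ⟨z, hz1, List.mem_cons_of_mem _ hz2⟩
          · rintro ⟨z, hz1, hz2⟩
            rcases List.mem_cons.mp hz2 with rfl | hz2'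
            · rcases List.mem_cons.mp hz1 with rfl | hz1'
              · exact absurd rfl hxy
              · exact absurd (ha.1 _ hz1') (not_le.mpr hyx)
            · exact ⟨z, hz1, hz2'⟩

-- ===== VERDICT =====
theorem memory_applies_py_spec : Claim_equal_memory_applies_py := by
  intro memory operation_type context _
  unfold Spec_memory_applies_py memory_applies_py memory_applies_py_alt
  set mt := PySem.Dict.getD (PySem.Dict.mk memory) "tags" [] with hmt
  set ct := PySem.Dict.getD (PySem.Dict.mk context) "tags" [] with hct
  show _ = pvMergeHas (PySem.List.sorted mt (fun x => x) false)
      (PySem.List.sorted (["user_global", operation_type] ++ ct) (fun x => x) false)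
  simp only [Bool.if_true_left, Bool.if_false_right]
  rw [Bool.eq_iff_iff]
  rw [pvMergeHas_iff _ _ (PySem.List.sorted_pairwise _ _) (PySem.List.sorted_pairwise _ _)]
  simp only [decide_eq_true_eq, PySem.List.mem_sorted, Bool.or_eq_true, Bool.and_eq_true,
    List.any_eq_true, List.contains_eq_mem, List.mem_append, List.mem_cons,
    List.not_mem_nil, or_false, decide_eq_true_eq, Bool.and_true]
  constructor
  · rintro (h | h | ⟨z, hz, hc⟩)
    · exact ⟨"user_global", h, Or.inl (Or.inl rfl)⟩
    · exact ⟨operation_type, h, Or.inl (Or.inr rfl)⟩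
    · exact ⟨z, hz, Or.inr hc⟩
  · rintro ⟨z, hz, hcase⟩
    rcases hcase with (rfl | rfl) | hc
    · exact Or.inl hz
    · exact Or.inr (Or.inl hz)
    · exact Or.inr (Or.inr ⟨z, hz, hc⟩)
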